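-- pv_equiv track=rewrite | github.com/Leishkychan/cybersentinel-agent | cybersentinel/reporting/compliance.py | _get_max_severity
-- ===== SOURCE A (Python) =====
-- from typing import Optional, Dict, List, Set
--
-- def _get_max_severity(findings: List[Dict], finding_titles: List[str]) -> str:
--     """Get maximum severity from a list of finding titles."""
--     severity_order = {"critical": 0, "high": 1, "medium": 2, "low": 3, "informational": 4}
--     max_sev = "informational"
--     max_order = 4
--
--     for finding in findings:
--         if finding.get('title', '') in finding_titles:
--             sev = finding.get('severity', 'informational')
--             order = severity_order.get(sev, 4)
--             if order < max_order:
--                 max_sev = sev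
--                 max_order = order
--
--     return max_sev
-- ===== SOURCE B (Python) =====
-- def _get_max_severity(findings, finding_titles):
--     """Get maximum severity from a list of finding titles."""
--     order = ["critical", "high", "medium", "low", "informational"]
--     known = set(order)
--     present = {f.get('severity', 'informational') for f in findings
--                if f.get('title', '') in finding_titles
--                and f.get('severity', 'informational') in known}
--     for name in order:
--         if name in present:
--             return name
--     return "informational"
-- ===== Notes on version B (the rewrite author's own statement) =====
-- stated objective: simpler
-- what changed: Replaces the running (severity, order) minimum accumulator with a presence set of known severities of matching findings followed by a short scan of the fixed priority list, returning the first level present.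
import Mathlib
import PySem

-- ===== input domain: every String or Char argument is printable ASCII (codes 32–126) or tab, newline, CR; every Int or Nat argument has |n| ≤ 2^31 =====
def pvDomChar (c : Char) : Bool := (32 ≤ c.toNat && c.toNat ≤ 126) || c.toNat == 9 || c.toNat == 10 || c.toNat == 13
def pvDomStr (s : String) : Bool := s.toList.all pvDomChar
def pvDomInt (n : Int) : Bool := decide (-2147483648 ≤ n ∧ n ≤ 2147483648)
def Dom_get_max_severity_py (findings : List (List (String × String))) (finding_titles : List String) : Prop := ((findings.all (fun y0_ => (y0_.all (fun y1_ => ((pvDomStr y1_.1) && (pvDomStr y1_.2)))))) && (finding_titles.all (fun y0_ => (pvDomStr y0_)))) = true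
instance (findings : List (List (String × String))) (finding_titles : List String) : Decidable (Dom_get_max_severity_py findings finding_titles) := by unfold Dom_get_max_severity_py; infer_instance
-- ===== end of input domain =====

-- B replaces A's running (severity, order) minimum accumulator with a presence set of known
-- severities of matching findings plus a scan of the fixed priority list (objective: simpler).


-- ===== PORT A =====
def get_max_severity_py (findings : List (List (String × String))) (finding_titles : List String) : String :=
  let severity_order : PySem.Dict String Int :=
    PySem.Dict.mk [("critical", 0), ("high", 1), ("medium", 2), ("low", 3), ("informational", 4)]
  let st := findings.foldl (fun (st : String × Int) finding =>
    if finding_titles.contains (PySem.Dict.getD (PySem.Dict.mk finding) "title" "") then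
      let sev := PySem.Dict.getD (PySem.Dict.mk finding) "severity" "informational"
      let order := PySem.Dict.getD severity_order sev 4
      if order < st.2 then (sev, order) else st
    else st) ("informational", 4)
  st.1

-- ===== PORT B =====
def get_max_severity_py_alt (findings : List (List (String × String))) (finding_titles : List String) : String :=
  let order : List String := ["critical", "high", "medium", "low", "informational"]
  let known : PySem.Set String := PySem.Set.ofList order
  let present : PySem.Set String := findings.foldl (fun s f =>
    let sev := PySem.Dict.getD (PySem.Dict.mk f) "severity" "informational"
    if finding_titles.contains (PySem.Dict.getD (PySem.Dict.mk f) "title" "") && PySem.Set.contains known sev then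
      PySem.Set.add s sev
    else s) PySem.Set.empty
  match order.find? (fun name => PySem.Set.contains present name) with
  | some name => name
  | none => "informational"

-- ===== PRECONDITION & SPEC =====
def Spec_get_max_severity_py (findings : List (List (String × String))) (finding_titles : List String) (out : String) : Prop := out = get_max_severity_py_alt findings finding_titles
instance (findings : List (List (String × String))) (finding_titles : List String) (out : String) : Decidable (Spec_get_max_severity_py findings finding_titles out) := by unfold Spec_get_max_severity_py; infer_instance

-- ===== CLAIM (what is proved, stated in full; the proofs are below) =====
def Claim_equal_get_max_severity_py : Prop := ∀ (findings : List (List (String × String))) (finding_titles : List String), Dom_get_max_severity_py findings finding_titles → Spec_get_max_severity_py findings finding_titles (get_max_severity_py findings finding_titles)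

-- ===== LEMMAS AND PROOFS =====

/-- Does a finding match one of the given titles? -/
def pvMatches (titles : List String) (f : List (String × String)) : Bool :=
  titles.contains (PySem.Dict.getD (PySem.Dict.mk f) "title" "")

/-- The severity string of a finding. -/
def pvSev (f : List (String × String)) : String :=
  PySem.Dict.getD (PySem.Dict.mk f) "severity" "informational"

/-- Some matching finding has severity `lvl`. -/
def pvHas (titles : List String) (fs : List (List (String × String))) (lvl : String) : Bool :=
  fs.any (fun f => pvMatches titles f && pvSev f == lvl)

/-- Order assigned by `severity_order` (default 4). -/
def pvOrd (s : String) : Int :=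
  if s = "critical" then 0 else if s = "high" then 1 else if s = "medium" then 2
  else if s = "low" then 3 else 4

/-- Canonical name of an order value. -/
def pvName (o : Int) : String :=
  if o = 0 then "critical" else if o = 1 then "high" else if o = 2 then "medium"
  else if o = 3 then "low" else "informational"

/-- Best (lowest) order among matching findings. -/
def pvBest (titles : List String) (fs : List (List (String × String))) : Int :=
  if pvHas titles fs "critical" then 0 else if pvHas titles fs "high" then 1
  else if pvHas titles fs "medium" then 2 else if pvHas titles fs "low" then 3 else 4

lemma pvBest_bounds (titles : List String) (fs : List (List (String × String))) :
    0 ≤ pvBest titles fs ∧ pvBest titles fs ≤ 4 := by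
  unfold pvBest; split_ifs <;> omega

lemma pvOrd_bounds (s : String) : 0 ≤ pvOrd s ∧ pvOrd s ≤ 4 := by
  unfold pvOrd; split_ifs <;> omega

lemma getD_sevorder (s : String) :
    PySem.Dict.getD (PySem.Dict.mk [("critical", 0), ("high", 1), ("medium", 2), ("low", 3),
      ("informational", 4)] : PySem.Dict String Int) s 4 = pvOrd s := by
  rcases eq_or_ne s "critical" with h | h
  · subst h; decide
  rcases eq_or_ne s "high" with h2 | h2
  · subst h2; decide
  rcases eq_or_ne s "medium" with h3 | h3
  · subst h3; decide
  rcases eq_or_ne s "low" with h4 | h4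
  · subst h4; decide
  rcases eq_or_ne s "informational" with h5 | h5
  · subst h5; decide
  have c1 : ("critical" == s) = false := by rw [beq_eq_false_iff_ne]; exact fun e => h e.symm
  have c2 : ("high" == s) = false := by rw [beq_eq_false_iff_ne]; exact fun e => h2 e.symm
  have c3 : ("medium" == s) = false := by rw [beq_eq_false_iff_ne]; exact fun e => h3 e.symm
  have c4 : ("low" == s) = false := by rw [beq_eq_false_iff_ne]; exact fun e => h4 e.symm
  have c5 : ("informational" == s) = false := by rw [beq_eq_false_iff_ne]; exact fun e => h5 e.symm
  simp only [PySem.Dict.getD, PySem.Dict.get?, List.find?, c1, c2, c3, c4, c5, pvOrd]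
  simp [h, h2, h3, h4, h5]

lemma pvName_pvOrd (s : String) (h : pvOrd s < 4) : pvName (pvOrd s) = s := by
  unfold pvOrd at *; unfold pvName
  split_ifs at * <;> simp_all <;> omega

/-- The "order chosen at one finding" (4 when the finding does not match). -/
def pvStepOrd (titles : List String) (f : List (String × String)) : Int :=
  if pvMatches titles f then pvOrd (pvSev f) else 4

lemma pvHas_cons (titles : List String) (f : List (String × String))
    (fs : List (List (String × String))) (lvl : String) :
    pvHas titles (f :: fs) lvl
      = ((pvMatches titles f && (pvSev f == lvl)) || pvHas titles fs lvl) := by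
  simp [pvHas]

lemma pvBest_cons (titles : List String) (f : List (String × String))
    (fs : List (List (String × String))) :
    pvBest titles (f :: fs) = min (pvStepOrd titles f) (pvBest titles fs) := by
  obtain ⟨hb0, hb4⟩ := pvBest_bounds titles fs
  unfold pvBest at *
  rw [pvHas_cons, pvHas_cons, pvHas_cons, pvHas_cons]
  by_cases hm : pvMatches titles f
  · rcases eq_or_ne (pvSev f) "critical" with h | h
    · simp [pvStepOrd, pvOrd, hm, h]
      all_goals split_ifs at * <;> omega
    · rcases eq_or_ne (pvSev f) "high" with h2 | h2
      · simp [pvStepOrd, pvOrd, hm, h2, h]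
        all_goals split_ifs at * <;> omega
      · rcases eq_or_ne (pvSev f) "medium" with h3 | h3
        · simp [pvStepOrd, pvOrd, hm, h3, h, h2]
          all_goals split_ifs at * <;> omega
        · rcases eq_or_ne (pvSev f) "low" with h4 | h4
          · simp [pvStepOrd, pvOrd, hm, h4, h, h2, h3]
            all_goals split_ifs at * <;> omega
          · simp [pvStepOrd, pvOrd, hm, h, h2, h3, h4]
            all_goals split_ifs at * <;> omega
  · simp only [Bool.not_eq_true] at hm
    simp [pvStepOrd, hm]
    all_goals split_ifs at * <;> omega

/-- The body of A's loop. -/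
def pvStepA (titles : List String) (st : String × Int) (finding : List (String × String)) :
    String × Int :=
  if titles.contains (PySem.Dict.getD (PySem.Dict.mk finding) "title" "") then
    (if PySem.Dict.getD (PySem.Dict.mk [("critical", 0), ("high", 1), ("medium", 2), ("low", 3),
          ("informational", 4)] : PySem.Dict String Int)
          (PySem.Dict.getD (PySem.Dict.mk finding) "severity" "informational") 4 < st.2 then
      (PySem.Dict.getD (PySem.Dict.mk finding) "severity" "informational",
       PySem.Dict.getD (PySem.Dict.mk [("critical", 0), ("high", 1), ("medium", 2), ("low", 3),
          ("informational", 4)] : PySem.Dict String Int)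
          (PySem.Dict.getD (PySem.Dict.mk finding) "severity" "informational") 4)
    else st)
  else st

lemma stepA_eq (titles : List String) (st : String × Int) (f : List (String × String)) :
    pvStepA titles st f
      = if pvMatches titles f then
          (if pvOrd (pvSev f) < st.2 then (pvSev f, pvOrd (pvSev f)) else st)
        else st := by
  unfold pvStepA pvMatches pvSev
  rw [getD_sevorder]

lemma foldA_eq (titles : List String) (fs : List (List (String × String))) :
    ∀ (o : Int), 0 ≤ o → o ≤ 4 →
      fs.foldl (pvStepA titles) (pvName o, o)
        = (pvName (min o (pvBest titles fs)), min o (pvBest titles fs)) := by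
  induction fs with
  | nil =>
    intro o h0 h4
    have : pvBest titles ([] : List (List (String × String))) = 4 := by
      simp [pvBest, pvHas]
    rw [List.foldl_nil, this]
    have : min o (4 : Int) = o := by omega
    rw [this]
  | cons f fs ih =>
    intro o h0 h4
    obtain ⟨hb0, hb4⟩ := pvBest_bounds titles fs
    obtain ⟨ho0, ho4⟩ := pvOrd_bounds (pvSev f)
    rw [List.foldl_cons, pvBest_cons, stepA_eq]
    by_cases hm : pvMatches titles f
    · have hso : pvStepOrd titles f = pvOrd (pvSev f) := by simp [pvStepOrd, hm]
      rw [if_pos hm]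
      by_cases hlt : pvOrd (pvSev f) < o
      · have hpair : ((pvSev f, pvOrd (pvSev f)) : String × Int)
            = (pvName (pvOrd (pvSev f)), pvOrd (pvSev f)) := by
          rw [pvName_pvOrd _ (by omega)]
        rw [if_pos hlt, hpair, ih _ ho0 ho4]
        have : min (pvOrd (pvSev f)) (pvBest titles fs)
            = min o (min (pvStepOrd titles f) (pvBest titles fs)) := by rw [hso]; omega
        rw [this]
      · rw [if_neg hlt, ih _ h0 h4]
        have : min o (pvBest titles fs)
            = min o (min (pvStepOrd titles f) (pvBest titles fs)) := by rw [hso]; omega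
        rw [this]
    · have hso : pvStepOrd titles f = 4 := by simp [pvStepOrd, hm]
      rw [if_neg hm, ih _ h0 h4]
      have : min o (pvBest titles fs)
          = min o (min (pvStepOrd titles f) (pvBest titles fs)) := by rw [hso]; omega
      rw [this]

lemma A_char (findings : List (List (String × String))) (titles : List String) :
    get_max_severity_py findings titles = pvName (pvBest titles findings) := by
  obtain ⟨hb0, hb4⟩ := pvBest_bounds titles findings
  have h := foldA_eq titles findings 4 (by omega) (by omega)
  rw [show ((pvName 4, (4 : Int)) : String × Int) = ("informational", 4) by rfl] at h
  have hmin : min (4 : Int) (pvBest titles findings) = pvBest titles findings := by omega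
  rw [hmin] at h
  show (findings.foldl (pvStepA titles) ("informational", 4)).1 = pvName (pvBest titles findings)
  rw [h]

lemma contains_add (s : PySem.Set String) (x lvl : String) :
    PySem.Set.contains (PySem.Set.add s x) lvl = (PySem.Set.contains s lvl || (x == lvl)) := by
  rw [Bool.eq_iff_iff]
  simp [PySem.Set.contains, PySem.Set.mem_add]
  tauto

/-- Membership in B's present-set, generalized over the accumulator. -/
lemma present_contains (titles : List String) (lvl : String)
    (hlvl : pvOrd lvl < 4 ∨ lvl = "informational") (fs : List (List (String × String))) :
    ∀ (s : PySem.Set String),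
      PySem.Set.contains
        (fs.foldl (fun s f =>
          let sev := PySem.Dict.getD (PySem.Dict.mk f) "severity" "informational"
          if titles.contains (PySem.Dict.getD (PySem.Dict.mk f) "title" "") &&
              PySem.Set.contains (PySem.Set.ofList
                ["critical", "high", "medium", "low", "informational"]) sev then
            PySem.Set.add s sev
          else s) s) lvl
        = (PySem.Set.contains s lvl || pvHas titles fs lvl) := by
  induction fs with
  | nil => intro s; simp [pvHas]
  | cons f fs ih =>
    intro s
    rw [List.foldl_cons]
    have hmm : pvMatches titles f = titles.contains (PySem.Dict.getD (PySem.Dict.mk f) "title" "") := rfl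
    have hss : pvSev f = PySem.Dict.getD (PySem.Dict.mk f) "severity" "informational" := rfl
    by_cases hm : titles.contains (PySem.Dict.getD (PySem.Dict.mk f) "title" "")
    · by_cases hk : PySem.Set.contains (PySem.Set.ofList
          ["critical", "high", "medium", "low", "informational"])
          (PySem.Dict.getD (PySem.Dict.mk f) "severity" "informational")
      · rw [show (if titles.contains (PySem.Dict.getD (PySem.Dict.mk f) "title" "") &&
              PySem.Set.contains (PySem.Set.ofList
                ["critical", "high", "medium", "low", "informational"])
                (PySem.Dict.getD (PySem.Dict.mk f) "severity" "informational") then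
            PySem.Set.add s (PySem.Dict.getD (PySem.Dict.mk f) "severity" "informational")
          else s) = PySem.Set.add s (PySem.Dict.getD (PySem.Dict.mk f) "severity" "informational")
          from by rw [if_pos (by rw [hm, hk]; rfl)]]
        rw [ih, pvHas_cons, contains_add, hmm, hss]
        simp only [hm, Bool.true_and]
        rcases Bool.eq_false_or_eq_true (PySem.Dict.getD (PySem.Dict.mk f) "severity" "informational" == lvl) with he | he <;>
          rcases Bool.eq_false_or_eq_true (PySem.Set.contains s lvl) with hs | hs <;>
          simp [he, hs]
      · rw [show (if titles.contains (PySem.Dict.getD (PySem.Dict.mk f) "title" "") &&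
              PySem.Set.contains (PySem.Set.ofList
                ["critical", "high", "medium", "low", "informational"])
                (PySem.Dict.getD (PySem.Dict.mk f) "severity" "informational") then
            PySem.Set.add s (PySem.Dict.getD (PySem.Dict.mk f) "severity" "informational")
          else s) = s from by rw [if_neg (by simp only [Bool.and_eq_true]; exact fun hab => hk hab.2)]]
        rw [ih, pvHas_cons, hss]
        have hne : (PySem.Dict.getD (PySem.Dict.mk f) "severity" "informational" == lvl) = false := by
          rw [beq_eq_false_iff_ne]
          intro he
          apply hk
          rw [he]
          rcases hlvl with h | h
          · unfold pvOrd at h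
            split_ifs at h with h1 h2 h3 h4
            · rw [h1]; decide
            · rw [h2]; decide
            · rw [h3]; decide
            · rw [h4]; decide
            · omega
          · rw [h]; decide
        simp [hne]
    · rw [show (if titles.contains (PySem.Dict.getD (PySem.Dict.mk f) "title" "") &&
            PySem.Set.contains (PySem.Set.ofList
              ["critical", "high", "medium", "low", "informational"])
              (PySem.Dict.getD (PySem.Dict.mk f) "severity" "informational") then
          PySem.Set.add s (PySem.Dict.getD (PySem.Dict.mk f) "severity" "informational")
        else s) = s from by rw [if_neg (by simp only [Bool.and_eq_true]; exact fun hab => hm hab.1)]]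
      rw [ih, pvHas_cons, hmm]
      have hm2 : PySem.Dict.getD (PySem.Dict.mk f) "title" "" ∉ titles := by
        simpa using hm
      simp [hm2]

lemma B_char (findings : List (List (String × String))) (titles : List String) :
    get_max_severity_py_alt findings titles = pvName (pvBest titles findings) := by
  unfold get_max_severity_py_alt
  have hc := present_contains titles "critical" (by left; decide) findings PySem.Set.empty
  have hh := present_contains titles "high" (by left; decide) findings PySem.Set.empty
  have hme := present_contains titles "medium" (by left; decide) findings PySem.Set.empty
  have hl := present_contains titles "low" (by left; decide) findings PySem.Set.empty
  have hi := present_contains titles "informational" (by right; rfl) findings PySem.Set.empty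
  have he : PySem.Set.contains (PySem.Set.empty : PySem.Set String) = fun _ => false := by
    funext x; rfl
  rw [he] at hc hh hme hl hi
  simp only [Bool.false_or] at hc hh hme hl hi
  simp only [List.find?]
  rw [hc, hh, hme, hl, hi]
  unfold pvBest pvName
  by_cases h1 : pvHas titles findings "critical" <;>
    by_cases h2 : pvHas titles findings "high" <;>
    by_cases h3 : pvHas titles findings "medium" <;>
    by_cases h4 : pvHas titles findings "low" <;>
    by_cases h5 : pvHas titles findings "informational" <;>
    simp [h1, h2, h3, h4, h5]

-- ===== VERDICT (by name: the statement is the Claim_ definition above) =====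
theorem get_max_severity_py_spec : Claim_equal_get_max_severity_py := by
  intro findings finding_titles _
  unfold Spec_get_max_severity_py
  rw [A_char, B_char]
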